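-- pv_equiv track=rewrite | github.com/jcolinpatrick/kryptos | scripts/transposition/other/e_s_07_sa_permutation.py | score_single_period
-- ===== SOURCE A (Python) =====
-- from collections import Counter, defaultdict
--
-- def score_single_period(key_dict, period, groups):
--     """Score period consistency for a single period."""
--     total = 0
--     for indices in groups.values():
--         k = len(indices)
--         if k == 1:
--             total += 1
--             continue
--         vals = [key_dict[p] for p in indices]
--         best_count = Counter(vals).most_common(1)[0][1]
--         total += best_count
--     return total
-- ===== SOURCE B (Python) =====
-- def score_single_period(key_dict, period, groups):
--     """Score period consistency for a single period."""
--     total = 0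
--     for indices in groups.values():
--         if len(indices) == 1:
--             total += 1
--             continue
--         sorted_vals = sorted(key_dict[p] for p in indices)
--         prev = sorted_vals[0]
--         run = 1
--         best = 1
--         for v in sorted_vals[1:]:
--             if v == prev:
--                 run += 1
--                 if run > best:
--                     best = run
--             else:
--                 prev = v
--                 run = 1
--         total += best
--     return total
-- ===== Notes on version B (the rewrite author's own statement) =====
-- stated objective: alternative
-- what changed: Per group (beyond the shared k==1 shortcut), B computes the mode frequency by sorting the group's values and scanning for the longest run of equal elements (tracking prev/run/best) instead of building a Counter and taking most_common(1).
import Mathlib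
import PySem

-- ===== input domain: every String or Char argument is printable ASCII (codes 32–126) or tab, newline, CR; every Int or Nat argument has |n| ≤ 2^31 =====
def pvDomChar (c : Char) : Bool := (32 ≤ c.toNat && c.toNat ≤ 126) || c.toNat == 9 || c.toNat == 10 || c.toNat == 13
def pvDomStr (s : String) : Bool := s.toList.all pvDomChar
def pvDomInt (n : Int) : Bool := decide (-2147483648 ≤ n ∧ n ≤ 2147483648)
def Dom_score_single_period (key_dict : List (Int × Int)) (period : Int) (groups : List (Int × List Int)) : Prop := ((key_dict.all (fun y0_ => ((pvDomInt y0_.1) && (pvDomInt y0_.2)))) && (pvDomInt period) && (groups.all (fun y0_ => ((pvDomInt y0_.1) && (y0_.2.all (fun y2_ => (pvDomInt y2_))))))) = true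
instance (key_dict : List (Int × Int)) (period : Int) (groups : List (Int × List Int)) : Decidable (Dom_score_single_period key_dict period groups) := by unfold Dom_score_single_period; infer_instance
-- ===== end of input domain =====

-- B replaces Counter-based mode counting by sort-then-run-scan per group (alternative decomposition, same result).


-- ===== PORT A =====
-- total = 0; for indices in groups.values(): k==1 branch, else Counter(vals).most_common(1)[0][1]
-- (most_common(1)[0][1] is the largest counter value; ported as max? over the counter's values,
-- getD 0 is reached only where Python raises IndexError — excluded by Pre_)
def score_single_period (key_dict : List (Int × Int)) (period : Int) (groups : List (Int × List Int)) : Int :=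
  let kd := PySem.Dict.ofList key_dict
  groups.foldl (fun total g =>
    let indices := g.2
    if (indices.length : Int) = 1 then total + 1
    else
      let vals := indices.map (fun p => (kd.get? p).getD 0)
      let best_count := (PySem.List.max? (PySem.Dict.counter vals).values (fun c => c)).getD 0
      total + best_count) 0

-- ===== PORT B =====
-- the inner run-scan: state (prev, run, best), started at (sorted_vals[0], 1, 1)
def spStep (st : Int × Int × Int) (v : Int) : Int × Int × Int :=
  if v = st.1 then
    (st.1, st.2.1 + 1, if st.2.1 + 1 > st.2.2 then st.2.1 + 1 else st.2.2)
  else (v, 1, st.2.2)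

def score_single_period_alt (key_dict : List (Int × Int)) (period : Int) (groups : List (Int × List Int)) : Int :=
  let kd := PySem.Dict.ofList key_dict
  groups.foldl (fun total g =>
    if (g.2.length : Int) = 1 then total + 1
    else
      let best :=
        match PySem.List.sorted (g.2.map (fun p => (kd.get? p).getD 0)) (fun x => x) false with
        | [] => 0  -- unreachable: Python raises IndexError on sorted_vals[0]; excluded by Pre_
        | v0 :: rest => (rest.foldl spStep (v0, 1, 1)).2.2
      total + best) 0

-- ===== PRECONDITION & SPEC =====
-- Pre_ excludes exactly the inputs on which both Pythons raise: a non-singleton group with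
-- an empty index list (IndexError) or with an index missing from key_dict (KeyError).
def Pre_score_single_period (key_dict : List (Int × Int)) (period : Int) (groups : List (Int × List Int)) : Prop :=
  ∀ g ∈ groups, g.2.length = 1 ∨ (g.2 ≠ [] ∧ ∀ p ∈ g.2, (PySem.Dict.ofList key_dict).contains p = true)
instance (key_dict : List (Int × Int)) (period : Int) (groups : List (Int × List Int)) : Decidable (Pre_score_single_period key_dict period groups) := by unfold Pre_score_single_period; infer_instance

def pvWitness_score_single_period : (List (Int × Int)) × Int × (List (Int × List Int)) :=
  ([(0, 1), (1, 1), (2, 2)], 3, [(0, [0, 1, 2]), (1, [2])])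

def Spec_score_single_period (key_dict : List (Int × Int)) (period : Int) (groups : List (Int × List Int)) (out : Int) : Prop := out = score_single_period_alt key_dict period groups
instance (key_dict : List (Int × Int)) (period : Int) (groups : List (Int × List Int)) (out : Int) : Decidable (Spec_score_single_period key_dict period groups out) := by unfold Spec_score_single_period; infer_instance

-- ===== CLAIM (what is proved, stated in full; the proofs are below) =====
def Claim_equal_score_single_period : Prop := ∀ (key_dict : List (Int × Int)) (period : Int) (groups : List (Int × List Int)), Dom_score_single_period key_dict period groups → Pre_score_single_period key_dict period groups → Spec_score_single_period key_dict period groups (score_single_period key_dict period groups)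

-- ===== LEMMAS AND PROOFS =====

-- Invariant of the run-scan: over a sorted tail, if the state describes the processed
-- prefix u (prev is u's maximum, run its count, best an attained maximal count),
-- the final best is an attained maximal count of u ++ rest.
theorem spStep_invariant (rest : List Int) :
    ∀ (u : List Int) (prev run best : Int),
      (u ++ rest).Pairwise (· ≤ ·) →
      prev ∈ u → (∀ x ∈ u, x ≤ prev) →
      run = (u.count prev : Int) →
      (∀ x ∈ u, (u.count x : Int) ≤ best) →
      (∃ y ∈ u, best = (u.count y : Int)) →
      (∀ x ∈ u ++ rest, ((u ++ rest).count x : Int) ≤ (rest.foldl spStep (prev, run, best)).2.2) ∧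
      (∃ y ∈ u ++ rest, (rest.foldl spStep (prev, run, best)).2.2 = ((u ++ rest).count y : Int)) := by
  induction rest with
  | nil =>
    intro u prev run best _ _ _ _ hle hatt
    simpa using ⟨hle, hatt⟩
  | cons v rs ih =>
    intro u prev run best hpw hmem hmax hrun hle hatt
    have hpw' : ((u ++ [v]) ++ rs).Pairwise (· ≤ ·) := by
      simpa [List.append_assoc] using hpw
    have hcross : ∀ x ∈ u, x ≤ v := by
      rw [List.pairwise_append] at hpw
      intro x hx
      exact hpw.2.2 x hx v (by simp)
    have hrw : u ++ v :: rs = (u ++ [v]) ++ rs := by simp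
    rw [hrw, List.foldl_cons]
    by_cases hv : v = prev
    · -- extend the current run
      subst hv
      have hstep : spStep (v, run, best) v =
          (v, run + 1, if run + 1 > best then run + 1 else best) := by
        simp [spStep]
      rw [hstep]
      apply ih (u ++ [v]) v (run + 1) (if run + 1 > best then run + 1 else best) hpw'
      · simp
      · intro x hx
        rcases List.mem_append.1 hx with h | h
        · exact hmax x h
        · simp at h; omega
      · simp [List.count_append, hrun]
      · intro x hx
        by_cases hxv : x = v
        · subst hxv
          simp [List.count_append, ← hrun]
          split <;> omega
        · have hx' : x ∈ u := by
            rcases List.mem_append.1 hx with h | h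
            · exact h
            · simp at h; exact absurd h hxv
          have : (u.count x : Int) ≤ best := hle x hx'
          have hcnt : (u ++ [v]).count x = u.count x := by
            simp [List.count_append, Ne.symm hxv]
          rw [hcnt]
          split <;> omega
      · by_cases hgt : run + 1 > best
        · refine ⟨v, by simp, ?_⟩
          simp [List.count_append, ← hrun, hgt]
        · obtain ⟨y, hy, hby⟩ := hatt
          by_cases hyv : y = v
          · subst hyv
            exfalso
            rw [hby] at hgt
            rw [hrun] at hgt
            omega
          · refine ⟨y, by simp [hy], ?_⟩
            have hcnt : (u ++ [v]).count y = u.count y := by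
              simp [List.count_append, Ne.symm hyv]
            rw [if_neg hgt, hcnt]
            exact hby
    · -- a new, strictly larger value starts a run of length 1
      have hvnotu : v ∉ u := by
        intro hvu
        have h1 : v ≤ prev := hmax v hvu
        have h2 : prev ≤ v := hcross prev hmem
        exact hv (le_antisymm h1 h2)
      have hstep : spStep (prev, run, best) v = (v, 1, best) := by
        simp [spStep, hv]
      rw [hstep]
      apply ih (u ++ [v]) v 1 best hpw'
      · simp
      · intro x hx
        rcases List.mem_append.1 hx with h | h
        · exact hcross x h
        · simp at h; omega
      · have : (u ++ [v]).count v = 1 := by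
          simp [List.count_append, List.count_eq_zero_of_not_mem hvnotu]
        rw [this]; simp
      · intro x hx
        by_cases hxv : x = v
        · have h1 : (u ++ [v]).count x = 1 := by
            rw [hxv]
            simp [List.count_append, List.count_eq_zero_of_not_mem hvnotu]
          rw [h1]
          obtain ⟨y, hy, hby⟩ := hatt
          have : 1 ≤ u.count y := List.one_le_count_iff.2 hy
          omega
        · have hx' : x ∈ u := by
            rcases List.mem_append.1 hx with h | h
            · exact h
            · simp at h; exact absurd h hxv
          have hcnt : (u ++ [v]).count x = u.count x := by
            simp [List.count_append, Ne.symm hxv]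
          rw [hcnt]; exact hle x hx'
      · obtain ⟨y, hy, hby⟩ := hatt
        have hyv : y ≠ v := fun h => hvnotu (h ▸ hy)
        refine ⟨y, by simp [hy], ?_⟩
        have hcnt : (u ++ [v]).count y = u.count y := by
          simp [List.count_append, Ne.symm hyv]
        rw [hcnt]; exact hby

-- the per-group value of B equals the per-group value of A, for a nonempty value list
theorem group_eq (vals : List Int) (h : vals ≠ []) :
    (match PySem.List.sorted vals (fun x => x) false with
     | [] => (0 : Int)
     | v0 :: rest => (rest.foldl spStep (v0, 1, 1)).2.2)
    = (PySem.List.max? (PySem.Dict.counter vals).values (fun c => c)).getD 0 := by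
  obtain ⟨v0, rest, hs⟩ : ∃ v0 rest, PySem.List.sorted vals (fun x => x) false = v0 :: rest := by
    cases hsv : PySem.List.sorted vals (fun x => x) false with
    | nil =>
      rw [PySem.List.sorted_eq_nil_iff] at hsv
      exact absurd hsv h
    | cons a t => exact ⟨a, t, rfl⟩
  have hperm : (v0 :: rest).Perm vals := hs ▸ PySem.List.sorted_perm vals (fun x => x) false
  have hpw : ([v0] ++ rest).Pairwise (· ≤ ·) := by
    have := PySem.List.sorted_pairwise vals (fun x => x)
    rw [hs] at this
    simpa using this
  have hinv := spStep_invariant rest [v0] v0 1 1 hpw (by simp) (by simp)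
    (by simp) (by intro x hx; simp at hx; simp [hx]) ⟨v0, by simp, by simp⟩
  obtain ⟨hble, y, hy, hby⟩ := hinv
  simp only [List.singleton_append] at hble hy hby
  set b := (rest.foldl spStep (v0, 1, 1)).2.2 with hb
  -- the counter's value list is the count of each distinct element
  have hvals : (PySem.Dict.counter vals).values
      = (PySem.Set.ofList vals).map (fun k => (vals.count k : Int)) := by
    simp [PySem.Dict.values, PySem.Dict.items_counter, List.map_map, Function.comp]
  have hdne : (PySem.Dict.counter vals).values ≠ [] := by
    rw [hvals]
    cases vals with
    | nil => exact absurd rfl h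
    | cons w t =>
      have : w ∈ PySem.Set.ofList (w :: t) := (PySem.Set.mem_ofList _ _).2 (by simp)
      intro hnil
      simp [List.map_eq_nil_iff] at hnil
      rw [hnil] at this
      simp at this
  cases hm : PySem.List.max? (PySem.Dict.counter vals).values (fun c => c) with
  | none =>
    rw [PySem.List.max?_eq_none_iff] at hm
    exact absurd hm hdne
  | some m =>
    have hmmem := PySem.List.max?_mem hm
    rw [hvals] at hmmem
    obtain ⟨a, ha, hma⟩ := List.mem_map.1 hmmem
    have ha' : a ∈ vals := (PySem.Set.mem_ofList _ _).1 ha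
    have hmax := PySem.List.max?_isMax hm
    have hallle : ∀ k ∈ vals, (vals.count k : Int) ≤ m := by
      intro k hk
      have hk' : k ∈ PySem.Set.ofList vals := (PySem.Set.mem_ofList _ _).2 hk
      exact hmax _ (hvals ▸ List.mem_map.2 ⟨k, hk', rfl⟩)
    -- b ≤ m
    have h1 : b ≤ m := by
      rw [hby, hperm.count_eq y]
      exact hallle y (hperm.mem_iff.1 hy)
    -- m ≤ b
    have h2 : m ≤ b := by
      rw [← hma, ← hperm.count_eq a]
      exact hble a (hperm.mem_iff.2 ha')
    rw [hs]
    simp only [Option.getD_some]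
    omega

-- ===== VERDICT (by name: the statement is the Claim_ definition above) =====
theorem score_single_period_spec : Claim_equal_score_single_period := by
  intro key_dict period groups _ hpre
  unfold Spec_score_single_period score_single_period score_single_period_alt
  dsimp only
  apply PySem.List.foldl_congr_mem
  intro acc g hg
  by_cases hk : ((g.2.length : Int) = 1)
  · rw [if_pos hk, if_pos hk]
  · rw [if_neg hk, if_neg hk]
    have hne : g.2 ≠ [] := by
      rcases hpre g hg with h1 | h2
      · exact fun hnil => hk (by simp [hnil] at h1)
      · exact h2.1
    have hvne : g.2.map (fun p => ((PySem.Dict.ofList key_dict).get? p).getD 0) ≠ [] := by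
      simpa using hne
    rw [group_eq _ hvne]
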